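-- pv_equiv track=rewrite | github.com/SaiB-sylvr/HydrogenAI | services/orchestrator/app/main.py | _are_intents_compatible
-- ===== SOURCE A (Python) =====
-- def _are_intents_compatible(intent1: str, intent2: str) -> bool:
--     """Check if two intents are compatible for cache reuse"""
--     compatible_groups = [
--         {"count", "list", "overview"},
--         {"analyze", "performance", "trends"},
--         {"compare", "ranking"},
--     ]
--
--     for group in compatible_groups:
--         if intent1 in group and intent2 in group:
--             return True
--
--     return intent1 == intent2
-- ===== SOURCE B (Python) =====
-- _CANON = {
--     "list": "count", "overview": "count",
--     "performance": "analyze", "trends": "analyze",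
--     "ranking": "compare",
-- }
--
-- def _are_intents_compatible(intent1: str, intent2: str) -> bool:
--     """Check if two intents are compatible for cache reuse"""
--     # Compatibility is an equivalence: normalize each intent to its group's
--     # canonical representative (itself if ungrouped), then compare for equality.
--     return _CANON.get(intent1, intent1) == _CANON.get(intent2, intent2)
-- ===== Notes on version B (the rewrite author's own statement) =====
-- stated objective: simpler
-- what changed: Recasts compatibility as equality after normalization: each intent is mapped to a canonical representative of its group (itself if ungrouped) and the two representatives are compared, removing both the pair-wise scan over groups and the separate equality fallback.
import Mathlib
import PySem

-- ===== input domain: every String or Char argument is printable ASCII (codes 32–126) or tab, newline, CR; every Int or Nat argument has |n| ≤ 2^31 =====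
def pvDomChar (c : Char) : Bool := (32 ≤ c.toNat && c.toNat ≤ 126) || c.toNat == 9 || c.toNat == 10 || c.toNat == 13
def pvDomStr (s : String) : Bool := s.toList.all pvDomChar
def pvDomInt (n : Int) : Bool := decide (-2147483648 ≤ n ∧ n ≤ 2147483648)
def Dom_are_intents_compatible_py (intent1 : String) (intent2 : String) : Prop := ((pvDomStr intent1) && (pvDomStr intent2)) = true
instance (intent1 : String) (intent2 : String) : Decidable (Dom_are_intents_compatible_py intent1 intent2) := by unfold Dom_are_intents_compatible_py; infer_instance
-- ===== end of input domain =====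

-- B recasts compatibility as equality after normalizing each intent to its group's canonical representative; objective: simpler, same behaviour.

-- ===== PORT A =====
-- the for-loop over compatible_groups, returning True on the first group containing both intents
def pvA_loop (intent1 : String) (intent2 : String) : List (PySem.Set String) → Bool
  | [] => intent1 == intent2
  | g :: rest =>
    if PySem.Set.contains g intent1 && PySem.Set.contains g intent2 then true
    else pvA_loop intent1 intent2 rest

def are_intents_compatible_py (intent1 : String) (intent2 : String) : Bool :=
  let compatible_groups : List (PySem.Set String) :=
    [PySem.Set.ofList ["count", "list", "overview"],
     PySem.Set.ofList ["analyze", "performance", "trends"],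
     PySem.Set.ofList ["compare", "ranking"]]
  pvA_loop intent1 intent2 compatible_groups

-- ===== PORT B =====
-- the module-level dict _CANON
def pvB_canon : PySem.Dict String String :=
  PySem.Dict.mk
    [("list", "count"), ("overview", "count"),
     ("performance", "analyze"), ("trends", "analyze"),
     ("ranking", "compare")]

def are_intents_compatible_py_alt (intent1 : String) (intent2 : String) : Bool :=
  pvB_canon.getD intent1 intent1 == pvB_canon.getD intent2 intent2

-- ===== PRECONDITION & SPEC =====
def Spec_are_intents_compatible_py (intent1 : String) (intent2 : String) (out : Bool) : Prop := out = are_intents_compatible_py_alt intent1 intent2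
instance (intent1 : String) (intent2 : String) (out : Bool) : Decidable (Spec_are_intents_compatible_py intent1 intent2 out) := by unfold Spec_are_intents_compatible_py; infer_instance

-- ===== CLAIM (what is proved, stated in full; the proofs are below) =====
def Claim_equal_are_intents_compatible_py : Prop := ∀ (intent1 : String) (intent2 : String), Dom_are_intents_compatible_py intent1 intent2 → Spec_are_intents_compatible_py intent1 intent2 (are_intents_compatible_py intent1 intent2)

-- ===== LEMMAS AND PROOFS =====

theorem pv_canon_spec (s : String) :
    pvB_canon.getD s s =
      (if s = "list" then "count" else if s = "overview" then "count"
       else if s = "performance" then "analyze" else if s = "trends" then "analyze"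
       else if s = "ranking" then "compare" else s) := by
  by_cases h1 : s = "list"
  · subst h1; decide
  by_cases h2 : s = "overview"
  · subst h2; decide
  by_cases h3 : s = "performance"
  · subst h3; decide
  by_cases h4 : s = "trends"
  · subst h4; decide
  by_cases h5 : s = "ranking"
  · subst h5; decide
  have e1 : ("list" == s) = false := by simp [Ne.symm h1]
  have e2 : ("overview" == s) = false := by simp [Ne.symm h2]
  have e3 : ("performance" == s) = false := by simp [Ne.symm h3]
  have e4 : ("trends" == s) = false := by simp [Ne.symm h4]
  have e5 : ("ranking" == s) = false := by simp [Ne.symm h5]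
  simp [pvB_canon, PySem.Dict.getD, PySem.Dict.get?, List.find?, e1, e2, e3, e4, e5,
    h1, h2, h3, h4, h5]

theorem pv_eq (intent1 intent2 : String) :
    are_intents_compatible_py intent1 intent2 = are_intents_compatible_py_alt intent1 intent2 := by
  simp only [are_intents_compatible_py, are_intents_compatible_py_alt, pvA_loop,
    PySem.Set.contains, PySem.Set.ofList, pv_canon_spec]
  split_ifs <;> simp_all <;> (constructor <;> rintro rfl <;> simp_all)

-- ===== VERDICT (by name: the statement is the Claim_ definition above) =====
theorem are_intents_compatible_py_spec : Claim_equal_are_intents_compatible_py := by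
  intro i1 i2 _
  unfold Spec_are_intents_compatible_py
  exact pv_eq i1 i2
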